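-- pv_equiv track=rewrite | github.com/AhmedAbdelaal2001/Food-Order-Parsing | utils.py | segment_orders
-- ===== SOURCE A (Python) =====
-- def segment_orders(words, labels):
--     """
--     Segments the input sentence into pizza and drink orders based on NER labels.
--
--     Args:
--         sentence (str): The input sentence to process.
--         ner_pipeline_instance (transformers.pipeline): The NER pipeline.
--
--     Returns:
--         tuple: Two lists containing pizza orders and drink orders respectively.
--     """
--
--     orders = []
--
--     current_pizza = []
--     current_drink = []
--
--     in_pizza = False
--     in_drink = False
--
--     for word, label in zip(words, labels):
--         # Handle Pizza Orders
--         if label == 'PIZZA_BEGIN':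
--             if in_pizza and current_pizza:
--                 orders.append((' '.join(current_pizza), True))
--                 current_pizza = []
--             in_pizza = True
--             current_pizza.append(word)
--         elif label == 'PIZZA_INTERMEDIATE' and in_pizza:
--             current_pizza.append(word)
--         else:
--             if in_pizza and current_pizza:
--                 orders.append((' '.join(current_pizza), True))
--                 current_pizza = []
--             in_pizza = False
--
--         # Handle Drink Orders
--         if label == 'DRINK_BEGIN':
--             if in_drink and current_drink:
--                 orders.append((' '.join(current_drink), False))
--                 current_drink = []
--             in_drink = True
--             current_drink.append(word)
--         elif label == 'DRINK_INTERMEDIATE' and in_drink: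
--             current_drink.append(word)
--         else:
--             if in_drink and current_drink:
--                 orders.append((' '.join(current_drink), False))
--                 current_drink = []
--             in_drink = False
--
--     # Append any remaining orders after the loop
--     if in_pizza and current_pizza:
--         orders.append((' '.join(current_pizza), True))
--     if in_drink and current_drink:
--         orders.append((' '.join(current_drink), False))
--
--     return orders
-- ===== SOURCE B (Python) =====
-- def segment_orders(words, labels):
--     segments = []
--     cur = None  # (list of words, is_pizza) for the currently open segment
--     for word, label in zip(words, labels):
--         if label == 'PIZZA_BEGIN' or label == 'DRINK_BEGIN':
--             if cur:
--                 segments.append(cur)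
--             cur = ([word], label == 'PIZZA_BEGIN')
--         elif cur is not None and label == ('PIZZA_INTERMEDIATE' if cur[1] else 'DRINK_INTERMEDIATE'):
--             cur[0].append(word)
--         else:
--             if cur:
--                 segments.append(cur)
--             cur = None
--     if cur:
--         segments.append(cur)
--     return [(' '.join(ws), p) for ws, p in segments]
-- ===== Notes on version B (the rewrite author's own statement) =====
-- stated objective: simpler
-- what changed: Replaced A's two parallel flag-machines (separate pizza/drink buffers and booleans, joining during the scan) by one build-segments-then-join decomposition: a single current-segment scan collecting (word_list, is_pizza) runs, then a comprehension joining each run; correct because in A any label closes the other machine, so at most one machine is ever open.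
import Mathlib
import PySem

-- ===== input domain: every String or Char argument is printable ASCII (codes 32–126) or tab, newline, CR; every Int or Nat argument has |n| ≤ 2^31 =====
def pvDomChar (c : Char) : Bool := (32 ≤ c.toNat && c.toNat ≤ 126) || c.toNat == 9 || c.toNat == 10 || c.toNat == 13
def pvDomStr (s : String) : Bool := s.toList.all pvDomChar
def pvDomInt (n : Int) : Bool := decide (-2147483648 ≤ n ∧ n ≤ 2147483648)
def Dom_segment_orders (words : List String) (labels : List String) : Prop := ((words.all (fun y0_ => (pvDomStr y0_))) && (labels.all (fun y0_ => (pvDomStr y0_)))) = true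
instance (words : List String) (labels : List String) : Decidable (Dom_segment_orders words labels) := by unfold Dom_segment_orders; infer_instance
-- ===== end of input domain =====

-- B replaces A's two parallel flag-machines by one build-segments-then-join decomposition (objective: simpler); return values are proved equal.

-- ===== PORT A =====
-- loop of A over zip(words, labels); state = (orders, current_pizza, current_drink, in_pizza, in_drink)
def segAloop : List (String × String) → List (String × Bool) → List String → List String → Bool → Bool → List (String × Bool)
  | [], orders, cp, cd, ip, idk =>
      -- append any remaining orders after the loop
      let orders1 := if ip = true ∧ cp ≠ [] then orders ++ [(PySem.Str.join " " cp, true)] else orders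
      let orders2 := if idk = true ∧ cd ≠ [] then orders1 ++ [(PySem.Str.join " " cd, false)] else orders1
      orders2
  | (w, l) :: rest, orders, cp, cd, ip, idk =>
      -- Handle Pizza Orders: result (orders', current_pizza', in_pizza')
      let pz : List (String × Bool) × List String × Bool :=
        if l = "PIZZA_BEGIN" then
          if ip = true ∧ cp ≠ [] then (orders ++ [(PySem.Str.join " " cp, true)], [] ++ [w], true)
          else (orders, cp ++ [w], true)
        else if l = "PIZZA_INTERMEDIATE" ∧ ip = true then (orders, cp ++ [w], ip)
        else if ip = true ∧ cp ≠ [] then (orders ++ [(PySem.Str.join " " cp, true)], [], false)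
        else (orders, cp, false)
      -- Handle Drink Orders: result (orders'', current_drink', in_drink')
      let dr : List (String × Bool) × List String × Bool :=
        if l = "DRINK_BEGIN" then
          if idk = true ∧ cd ≠ [] then (pz.1 ++ [(PySem.Str.join " " cd, false)], [] ++ [w], true)
          else (pz.1, cd ++ [w], true)
        else if l = "DRINK_INTERMEDIATE" ∧ idk = true then (pz.1, cd ++ [w], idk)
        else if idk = true ∧ cd ≠ [] then (pz.1 ++ [(PySem.Str.join " " cd, false)], [], false)
        else (pz.1, cd, false)
      segAloop rest dr.1 pz.2.1 dr.2.1 pz.2.2 dr.2.2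

def segment_orders (words : List String) (labels : List String) : List (String × Bool) :=
  segAloop (words.zip labels) [] [] [] false false

-- ===== PORT B =====
-- loop of B: state = (segments, cur) where cur = the open segment (words, is_pizza) or none
def segBloop : List (String × String) → List (List String × Bool) → Option (List String × Bool) → List (List String × Bool)
  | [], segs, cur =>
      match cur with
      | some (ws, b) => if ws ≠ [] then segs ++ [(ws, b)] else segs
      | none => segs
  | (w, l) :: rest, segs, cur =>
      if l = "PIZZA_BEGIN" ∨ l = "DRINK_BEGIN" then
        let segs1 :=
          match cur with
          | some (ws, b) => if ws ≠ [] then segs ++ [(ws, b)] else segs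
          | none => segs
        segBloop rest segs1 (some ([w], l = "PIZZA_BEGIN"))
      else
        match cur with
        | some (ws, b) =>
            if l = (if b then "PIZZA_INTERMEDIATE" else "DRINK_INTERMEDIATE") then
              segBloop rest segs (some (ws ++ [w], b))
            else
              segBloop rest (if ws ≠ [] then segs ++ [(ws, b)] else segs) none
        | none => segBloop rest segs none

def segment_orders_alt (words : List String) (labels : List String) : List (String × Bool) :=
  (segBloop (words.zip labels) [] none).map (fun s => (PySem.Str.join " " s.1, s.2))

-- ===== PRECONDITION & SPEC =====
def Spec_segment_orders (words : List String) (labels : List String) (out : List (String × Bool)) : Prop := out = segment_orders_alt words labels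
instance (words : List String) (labels : List String) (out : List (String × Bool)) : Decidable (Spec_segment_orders words labels out) := by unfold Spec_segment_orders; infer_instance

-- ===== CLAIM (what is proved, stated in full; the proofs are below) =====
def Claim_equal_segment_orders : Prop := ∀ (words : List String) (labels : List String), Dom_segment_orders words labels → Spec_segment_orders words labels (segment_orders words labels)

-- ===== LEMMAS AND PROOFS =====

def pvJoinF (s : List String × Bool) : String × Bool := (PySem.Str.join " " s.1, s.2)

-- relation between B's state (cur) and A's state (cp, cd, ip, idk): at most one machine open
def pvRel : Option (List String × Bool) → List String → List String → Bool → Bool → Prop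
  | none, cp, cd, ip, idk => cp = [] ∧ cd = [] ∧ ip = false ∧ idk = false
  | some (ws, true), cp, cd, ip, idk => cp = ws ∧ ws ≠ [] ∧ cd = [] ∧ ip = true ∧ idk = false
  | some (ws, false), cp, cd, ip, idk => cd = ws ∧ ws ≠ [] ∧ cp = [] ∧ ip = false ∧ idk = true

lemma pvMain : ∀ (ps : List (String × String)) (segs : List (List String × Bool))
    (cur : Option (List String × Bool)) (cp cd : List String) (ip idk : Bool),
    pvRel cur cp cd ip idk →
    segAloop ps (segs.map pvJoinF) cp cd ip idk = (segBloop ps segs cur).map pvJoinF := by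
  intro ps
  induction ps with
  | nil =>
      intro segs cur cp cd ip idk hrel
      match cur with
      | none =>
          obtain ⟨h1, h2, h3, h4⟩ := hrel
          subst h1; subst h2; subst h3; subst h4
          simp [segAloop, segBloop]
      | some (ws, true) =>
          obtain ⟨h1, h2, h3, h4, h5⟩ := hrel
          subst h1; subst h3; subst h4; subst h5
          simp [segAloop, segBloop, h2, pvJoinF]
      | some (ws, false) =>
          obtain ⟨h1, h2, h3, h4, h5⟩ := hrel
          subst h1; subst h3; subst h4; subst h5
          simp [segAloop, segBloop, h2, pvJoinF]
  | cons p rest ih =>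
      obtain ⟨w, l⟩ := p
      intro segs cur cp cd ip idk hrel
      match cur with
      | none =>
          obtain ⟨h1, h2, h3, h4⟩ := hrel
          subst h1; subst h2; subst h3; subst h4
          by_cases hpb : l = "PIZZA_BEGIN"
          · subst hpb
            simp [segAloop, segBloop]
            exact ih segs (some ([w], true)) [w] [] true false (by simp [pvRel])
          by_cases hdb : l = "DRINK_BEGIN"
          · subst hdb
            simp [segAloop, segBloop]
            exact ih segs (some ([w], false)) [] [w] false true (by simp [pvRel])
          · simp [segAloop, segBloop, hpb, hdb]
            exact ih segs none [] [] false false (by simp [pvRel])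
      | some (ws, true) =>
          obtain ⟨h1, h2, h3, h4, h5⟩ := hrel
          subst h1; subst h3; subst h4; subst h5
          by_cases hpb : l = "PIZZA_BEGIN"
          · subst hpb
            simp [segAloop, segBloop, h2]
            rw [show (List.map pvJoinF segs ++ [(PySem.Str.join " " cp, true)]) = List.map pvJoinF (segs ++ [(cp, true)]) by simp [pvJoinF]]
            exact ih (segs ++ [(cp, true)]) (some ([w], true)) [w] [] true false (by simp [pvRel])
          by_cases hpi : l = "PIZZA_INTERMEDIATE"
          · subst hpi
            simp [segAloop, segBloop]
            exact ih segs (some (cp ++ [w], true)) (cp ++ [w]) [] true false (by simp [pvRel, h2])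
          by_cases hdb : l = "DRINK_BEGIN"
          · subst hdb
            simp [segAloop, segBloop, h2]
            rw [show (List.map pvJoinF segs ++ [(PySem.Str.join " " cp, true)]) = List.map pvJoinF (segs ++ [(cp, true)]) by simp [pvJoinF]]
            exact ih (segs ++ [(cp, true)]) (some ([w], false)) [] [w] false true (by simp [pvRel])
          · simp [segAloop, segBloop, h2, hpb, hpi, hdb]
            rw [show (List.map pvJoinF segs ++ [(PySem.Str.join " " cp, true)]) = List.map pvJoinF (segs ++ [(cp, true)]) by simp [pvJoinF]]
            exact ih (segs ++ [(cp, true)]) none [] [] false false (by simp [pvRel])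
      | some (ws, false) =>
          obtain ⟨h1, h2, h3, h4, h5⟩ := hrel
          subst h1; subst h3; subst h4; subst h5
          by_cases hpb : l = "PIZZA_BEGIN"
          · subst hpb
            simp [segAloop, segBloop, h2]
            rw [show (List.map pvJoinF segs ++ [(PySem.Str.join " " cd, false)]) = List.map pvJoinF (segs ++ [(cd, false)]) by simp [pvJoinF]]
            exact ih (segs ++ [(cd, false)]) (some ([w], true)) [w] [] true false (by simp [pvRel])
          by_cases hdb : l = "DRINK_BEGIN"
          · subst hdb
            simp [segAloop, segBloop, h2]
            rw [show (List.map pvJoinF segs ++ [(PySem.Str.join " " cd, false)]) = List.map pvJoinF (segs ++ [(cd, false)]) by simp [pvJoinF]]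
            exact ih (segs ++ [(cd, false)]) (some ([w], false)) [] [w] false true (by simp [pvRel])
          by_cases hdi : l = "DRINK_INTERMEDIATE"
          · subst hdi
            simp [segAloop, segBloop]
            exact ih segs (some (cd ++ [w], false)) [] (cd ++ [w]) false true (by simp [pvRel, h2])
          · simp [segAloop, segBloop, h2, hpb, hdb, hdi]
            rw [show (List.map pvJoinF segs ++ [(PySem.Str.join " " cd, false)]) = List.map pvJoinF (segs ++ [(cd, false)]) by simp [pvJoinF]]
            exact ih (segs ++ [(cd, false)]) none [] [] false false (by simp [pvRel])

-- ===== VERDICT (by name: the statement is the Claim_ definition above) =====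
theorem segment_orders_spec : Claim_equal_segment_orders := by
  intro words labels _
  unfold Spec_segment_orders segment_orders segment_orders_alt
  exact pvMain (words.zip labels) [] none [] [] false false (by simp [pvRel])
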